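-- pv_equiv track=rewrite | github.com/yeoeol/Algo | 프로그래머스/2/77885. 2개 이하로 다른 비트/2개 이하로 다른 비트.py | solution
-- ===== SOURCE A (Python) =====
-- def solution(numbers):
--     can = []
--     for num in numbers:
--         bin_num = list(bin(num)[2:])
--         for i in range(len(bin_num)-1, -1, -1):
--             if bin_num[i] == '0':
--                 bin_num[i] = '1'
--                 if i+1 < len(bin_num):
--                     bin_num[i+1] = '0'
--                 can.append(bin_num)
--                 break
--         else:
--             can.append(['1', '0'] + bin_num[1:])
--     ans = []
--     for lst in can:
--         ans.append(int(''.join(lst), 2))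
--     return ans
-- ===== SOURCE B (Python) =====
-- def solution(numbers):
--     # closed-form bit trick: z = lowest zero bit of n; set it, clear the bit below it
--     res = []
--     for n in numbers:
--         z = ~n & (n + 1)
--         res.append(n + z - (z >> 1))
--     return res
-- ===== Notes on version B (the rewrite author's own statement) =====
-- stated objective: faster
-- what changed: Replaces the binary-string construction, right-to-left character scan and re-parsing with int(...,2) by the closed-form bit trick z = ~n & (n+1), answer = n + z - (z >> 1), intended as faster; no intermediate 'can' list of character lists is built.
-- outside the precondition, e.g. on solution([-1]): A returns [5], B returns [-1]; on solution([-3]): A returns [11], B returns [-2]; on solution([-2]): A raises ValueError, B returns [-1]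
import Mathlib
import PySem

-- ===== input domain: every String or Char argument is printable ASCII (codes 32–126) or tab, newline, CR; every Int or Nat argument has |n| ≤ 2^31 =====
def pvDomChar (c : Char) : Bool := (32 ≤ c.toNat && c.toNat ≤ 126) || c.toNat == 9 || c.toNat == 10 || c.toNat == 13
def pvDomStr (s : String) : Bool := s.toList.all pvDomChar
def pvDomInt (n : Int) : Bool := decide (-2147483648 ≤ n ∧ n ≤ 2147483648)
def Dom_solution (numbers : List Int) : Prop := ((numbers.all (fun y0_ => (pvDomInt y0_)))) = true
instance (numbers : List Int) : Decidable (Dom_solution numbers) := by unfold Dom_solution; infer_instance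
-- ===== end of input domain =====

-- B replaces A's binary-string scan by the closed-form bit trick z = ~n & (n+1), n + z - (z >> 1).

-- ===== PORT A =====
-- bin(num)[2:] as a list of chars, big-endian; exact for num ≥ 0 (Pre_ excludes negatives)
def pvBinAux : Nat → List Char → List Char
  | 0, acc => acc
  | n+1, acc => pvBinAux ((n+1)/2) ((if (n+1) % 2 = 1 then '1' else '0') :: acc)
decreasing_by omega

-- bin(-m) = '-0b…', so [2:] keeps a stray 'b' before the digits of |num|
def pvBin (n : Int) : List Char :=
  if n = 0 then ['0']
  else if n < 0 then 'b' :: pvBinAux (-n).toNat []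
  else pvBinAux n.toNat []

-- A's inner 'for i in range(len-1,-1,-1)' with its break, transcribed as the structural
-- recursion over the REVERSED char list (rightmost char first = lowest index i = len-1 first):
-- find the first '0'; set it to '1' and, if there is a char at i+1 (the previously visited
-- one), set it to '0'.  none = the loop fell through (for-else).
def pvFlipRev : List Char → Option (List Char)
  | [] => none
  | c :: rest =>
    if c = '0' then some ('1' :: rest)
    else
      match rest with
      | [] => none
      | d :: rest2 =>
        if d = '0' then some ('0' :: '1' :: rest2)
        else
          match pvFlipRev (d :: rest2) with
          | none => none
          | some r => some (c :: r)

-- int(''.join(lst), 2); exact on lists of '0'/'1' chars (the only ones A builds)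
def pvParseBin (l : List Char) : Int :=
  l.foldl (fun acc c => 2 * acc + (if c = '1' then 1 else 0)) 0

def solution (numbers : List Int) : List Int :=
  let can := numbers.foldl (fun can num =>
    let bin_num := pvBin num
    match pvFlipRev bin_num.reverse with
    | some r => can ++ [r.reverse]
    | none => can ++ ['1' :: '0' :: bin_num.drop 1]) []
  can.foldl (fun ans lst => ans ++ [pvParseBin lst]) []

-- ===== PORT B =====
-- Int.land is Python's '&' (two's-complement on negatives), ~~~ is Python's '~',
-- Int.shiftRight is Python's '>>' (arithmetic shift)
def solution_alt (numbers : List Int) : List Int :=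
  numbers.foldl (fun res n =>
    let z := Int.land (~~~n) (n + 1)
    res ++ [n + z - Int.shiftRight z 1]) []

-- ===== PRECONDITION & SPEC =====
-- Pre_ excludes lists with a negative number: bin() gives '-0b…' there, the stray 'b'
-- survives the [2:] slice, and A either raises ValueError from int(.,2) or (when |n|+1 is a
-- power of two, so the scan falls through to the for-else which drops the 'b') returns a
-- value parsed from the sign-mangled string — an accident of slicing '-0b…' at a fixed offset.
def Pre_solution (numbers : List Int) : Prop := ∀ n ∈ numbers, 0 ≤ n
instance (numbers : List Int) : Decidable (Pre_solution numbers) := by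
  unfold Pre_solution; infer_instance

def pvWitness_solution : List Int := [0, 1, 2, 7, 8, 1023]

def Spec_solution (numbers : List Int) (out : List Int) : Prop := out = solution_alt numbers
instance (numbers : List Int) (out : List Int) : Decidable (Spec_solution numbers out) := by
  unfold Spec_solution; infer_instance

-- ===== CLAIM (what is proved, stated in full; the proofs are below) =====
def Claim_equal_solution : Prop :=
  ∀ (numbers : List Int), Dom_solution numbers → Pre_solution numbers →
    Spec_solution numbers (solution numbers)

-- ===== LEMMAS AND PROOFS =====

-- little-endian binary digits of a Nat (proof-side mirror of pvBinAux)
def dLE : Nat → List Char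
  | 0 => []
  | n+1 => (if (n+1) % 2 = 1 then '1' else '0') :: dLE ((n+1)/2)
decreasing_by omega

-- little-endian value of a char list
def valLE : List Char → Nat
  | [] => 0
  | c :: r => (if c = '1' then 1 else 0) + 2 * valLE r

-- the lowest zero bit of n, as produced by B's bit trick
def pvL (n : Nat) : Nat := Nat.ldiff (n + 1) n

theorem dLE_succ (n : Nat) :
    dLE (n+1) = (if (n+1) % 2 = 1 then '1' else '0') :: dLE ((n+1)/2) := by
  rw [dLE]

theorem dLE_two_mul (u : Nat) (h : 1 ≤ u) : dLE (2*u) = '0' :: dLE u := by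
  obtain ⟨v, hv⟩ : ∃ v, 2*u = v+1 := ⟨2*u-1, by omega⟩
  rw [hv, dLE_succ]
  have h1 : ¬ ((v+1) % 2 = 1) := by omega
  have h2 : (v+1) / 2 = u := by omega
  rw [if_neg h1, h2]

theorem dLE_odd (u : Nat) : dLE (2*u+1) = '1' :: dLE u := by
  rw [dLE_succ]
  have h1 : (2*u+1) % 2 = 1 := by omega
  have h2 : (2*u+1) / 2 = u := by omega
  rw [if_pos h1, h2]

theorem dLE_zero : dLE 0 = [] := by rw [dLE]

theorem pvFlipRev_zero (rest : List Char) : pvFlipRev ('0' :: rest) = some ('1' :: rest) := by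
  rw [pvFlipRev.eq_def]; simp

theorem pvFlipRev_cons_nil (c : Char) (hc : c ≠ '0') : pvFlipRev [c] = none := by
  rw [pvFlipRev.eq_def]; simp [hc]

theorem pvFlipRev_cons_zero (c : Char) (r2 : List Char) (hc : c ≠ '0') :
    pvFlipRev (c :: '0' :: r2) = some ('0' :: '1' :: r2) := by
  rw [pvFlipRev.eq_def]; simp [hc]

theorem pvFlipRev_cons_cons (c d : Char) (r2 : List Char) (hc : c ≠ '0') (hd : d ≠ '0') :
    pvFlipRev (c :: d :: r2) =
      match pvFlipRev (d :: r2) with | none => none | some r => some (c :: r) := by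
  rw [pvFlipRev.eq_def]; simp [hc, hd]

theorem pvFlipRev_one_nil : pvFlipRev ['1'] = none :=
  pvFlipRev_cons_nil '1' (by decide)

theorem pvFlipRev_one_zero (r2 : List Char) :
    pvFlipRev ('1' :: '0' :: r2) = some ('0' :: '1' :: r2) :=
  pvFlipRev_cons_zero '1' r2 (by decide)

theorem pvFlipRev_one_one (r2 : List Char) :
    pvFlipRev ('1' :: '1' :: r2) = match pvFlipRev ('1' :: r2) with
      | none => none | some r => some ('1' :: r) :=
  pvFlipRev_cons_cons '1' '1' r2 (by decide) (by decide)

theorem pvBinAux_eq (n : Nat) : ∀ acc, pvBinAux n acc = (dLE n).reverse ++ acc := by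
  induction n using Nat.strong_induction_on with
  | _ n ih =>
    intro acc
    match n with
    | 0 => simp [pvBinAux, dLE]
    | n+1 =>
      rw [pvBinAux, dLE_succ, ih ((n+1)/2) (by omega)]
      simp

theorem valLE_dLE (n : Nat) : valLE (dLE n) = n := by
  induction n using Nat.strong_induction_on with
  | _ n ih =>
    match n with
    | 0 => simp [dLE, valLE]
    | n+1 =>
      rw [dLE_succ, valLE, ih ((n+1)/2) (by omega)]
      rcases Nat.even_or_odd (n+1) with h | h
      · have : (n+1) % 2 = 0 := Nat.even_iff.mp h
        simp [this]; omega
      · have : (n+1) % 2 = 1 := Nat.odd_iff.mp h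
        simp [this]; omega

theorem dLE_chars (n : Nat) : ∀ c ∈ dLE n, c = '0' ∨ c = '1' := by
  induction n using Nat.strong_induction_on with
  | _ n ih =>
    match n with
    | 0 => simp [dLE]
    | n+1 =>
      rw [dLE_succ]
      intro c hc
      rcases List.mem_cons.mp hc with h | h
      · subst h; split_ifs <;> simp
      · exact ih ((n+1)/2) (by omega) c h

theorem dLE_ne_nil (n : Nat) (h : 1 ≤ n) : dLE n ≠ [] := by
  match n with
  | n+1 => rw [dLE_succ]; simp

theorem parse_reverse (l : List Char) : pvParseBin l.reverse = (valLE l : Int) := by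
  induction l with
  | nil => simp [pvParseBin, valLE]
  | cons c r ih =>
    rw [List.reverse_cons]
    unfold pvParseBin at *
    rw [List.foldl_append, ih]
    by_cases hc : c = '1' <;> simp [valLE, hc] <;> ring

-- the two recurrences for the lowest zero bit
theorem pvL_even (m : Nat) : pvL (2 * m) = 1 := by
  unfold pvL
  apply Nat.eq_of_testBit_eq
  intro k
  rw [Nat.testBit_ldiff]
  match k with
  | 0 =>
    have e1 : (2*m+1) % 2 = 1 := by omega
    have e2 : (2*m) % 2 = 0 := by omega
    simp [Nat.testBit_zero, e1, e2]
  | k+1 =>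
    rw [Nat.testBit_succ, Nat.testBit_succ]
    have h1 : (2 * m + 1) / 2 = m := by omega
    have h2 : (2 * m) / 2 = m := by omega
    rw [h1, h2]
    simp [Nat.testBit_succ]

theorem pvL_odd (m : Nat) : pvL (2 * m + 1) = 2 * pvL m := by
  unfold pvL
  apply Nat.eq_of_testBit_eq
  intro k
  rw [Nat.testBit_ldiff]
  have hmul : 2 * Nat.ldiff (m + 1) m = Nat.ldiff (m + 1) m * 2 ^ 1 := by ring
  match k with
  | 0 =>
    rw [hmul, Nat.testBit_mul_two_pow]
    simp [Nat.testBit_zero]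
  | k+1 =>
    rw [Nat.testBit_succ, Nat.testBit_succ]
    have h1 : (2 * m + 1 + 1) / 2 = m + 1 := by omega
    have h2 : (2 * m + 1) / 2 = m := by omega
    rw [h1, h2, hmul, Nat.testBit_mul_two_pow]
    simp [Nat.testBit_ldiff]

-- the break branch: whenever the loop found a '0', the produced list has the claimed value
theorem flip_some_val (n : Nat) : 1 ≤ n → ∀ r, pvFlipRev (dLE n) = some r →
    valLE r + pvL n / 2 = n + pvL n := by
  induction n using Nat.strong_induction_on with
  | _ n ih =>
    intro hn r hr
    rcases Nat.even_or_odd n with he | ho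
    · -- n = 2u, head digit '0'
      obtain ⟨u, hu⟩ := he
      have hu' : n = 2 * u := by omega
      subst hu'
      rw [dLE_two_mul u (by omega), pvFlipRev_zero] at hr
      obtain rfl : '1' :: dLE u = r := Option.some.inj hr
      rw [pvL_even]
      simp [valLE, valLE_dLE]
      omega
    · -- n = 2u+1, head digit '1'
      obtain ⟨u, hu⟩ := ho
      subst hu
      rw [dLE_odd] at hr
      match u, hr with
      | 0, hr =>
        rw [dLE_zero] at hr
        rw [pvFlipRev_one_nil] at hr
        exact absurd hr (by simp)
      | u'+1, hr =>
        rcases Nat.even_or_odd (u'+1) with he2 | ho2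
        · -- next digit '0': flip it, clear the head
          obtain ⟨v, hv⟩ := he2
          have hv' : u' + 1 = 2 * v := by omega
          rw [hv', dLE_two_mul v (by omega), pvFlipRev_one_zero] at hr
          obtain rfl : '0' :: '1' :: dLE v = r := Option.some.inj hr
          rw [hv', pvL_odd, pvL_even]
          simp [valLE, valLE_dLE]
          omega
        · -- next digit '1': recurse
          obtain ⟨v, hv⟩ := ho2
          have hv' : u' + 1 = 2 * v + 1 := by omega
          rw [hv', dLE_odd, pvFlipRev_one_one, ← dLE_odd] at hr
          rcases h : pvFlipRev (dLE (2*v+1)) with _ | r'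
          · rw [h] at hr; exact absurd hr (by simp)
          · rw [h] at hr
            obtain rfl : '1' :: r' = r := Option.some.inj hr
            have ihr := ih (2*v+1) (by omega) (by omega) r' h
            rw [pvL_odd] at ihr
            rw [hv', pvL_odd, pvL_odd]
            simp [valLE]
            omega

-- the for-else branch: the loop fell through only if no '0' occurs
theorem flip_none_no_zero (l : List Char) : pvFlipRev l = none → '0' ∉ l := by
  induction l with
  | nil => simp
  | cons c rest ih =>
    intro h
    by_cases hc : c = '0'
    · rw [hc, pvFlipRev_zero] at h; simp at h
    · match rest with
      | [] =>
        simp only [List.mem_singleton]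
        intro hx
        exact hc hx.symm
      | d :: rest2 =>
        by_cases hd : d = '0'
        · rw [hd, pvFlipRev_cons_zero c rest2 hc] at h
          simp at h
        · rw [pvFlipRev_cons_cons c d rest2 hc hd] at h
          rcases h2 : pvFlipRev (d :: rest2) with _ | r
          · have h0 := ih h2
            simp only [List.mem_cons, not_or] at h0 ⊢
            exact ⟨fun hx => hc hx.symm, h0.1, h0.2⟩
          · rw [h2] at h; simp at h

theorem valLE_replicate (k : Nat) : valLE (List.replicate k '1') = 2 ^ k - 1 := by
  induction k with
  | zero => simp [valLE]
  | succ k ih =>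
    rw [List.replicate_succ, valLE, ih]
    have h1 : 1 ≤ 2 ^ k := Nat.one_le_two_pow
    simp [pow_succ]
    omega

theorem pvL_allones (k : Nat) : pvL (2 ^ k - 1) = 2 ^ k := by
  induction k with
  | zero =>
    show pvL 0 = 1
    have := pvL_even 0
    simpa using this
  | succ k ih =>
    have h1 : 1 ≤ 2 ^ k := Nat.one_le_two_pow
    have h2 : 2 ^ (k+1) - 1 = 2 * (2 ^ k - 1) + 1 := by rw [pow_succ]; omega
    rw [h2, pvL_odd, ih, pow_succ]
    ring

theorem parse_one_zero_ones (j : Nat) :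
    pvParseBin ('1' :: '0' :: List.replicate j '1') = (2 ^ (j+1) : Int) + 2 ^ j - 1 := by
  have step : ∀ (j : Nat) (a : Int),
      List.foldl (fun acc c => 2 * acc + (if c = '1' then 1 else 0)) a (List.replicate j '1')
        = a * 2 ^ j + (2 ^ j - 1) := by
    intro j
    induction j with
    | zero => intro a; simp
    | succ j ih =>
      intro a
      rw [List.replicate_succ, List.foldl_cons, ih]
      simp
      ring
  unfold pvParseBin
  rw [List.foldl_cons, List.foldl_cons, step]
  simp
  ring

-- per-element equality: A's char machinery gives exactly B's closed form
theorem per_elem (m : Nat) :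
    pvParseBin (match pvFlipRev (pvBin (m : Int)).reverse with
      | some r => r.reverse
      | none => '1' :: '0' :: (pvBin (m : Int)).drop 1)
      = (m : Int) + (pvL m : Int) - (pvL m / 2 : Nat) := by
  match m with
  | 0 =>
    have h0 : pvL 0 = 1 := by have := pvL_even 0; simpa using this
    have hb : pvBin ((0 : Nat) : Int) = ['0'] := by simp [pvBin]
    rw [hb]
    simp only [List.reverse_cons, List.reverse_nil, List.nil_append]
    rw [pvFlipRev_zero]
    simp [pvParseBin, h0]
  | m+1 =>
    have hbin : pvBin ((m+1 : Nat) : Int) = (dLE (m+1)).reverse := by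
      unfold pvBin
      rw [if_neg (by omega), if_neg (by omega)]
      have : ((m+1 : Nat) : Int).toNat = m + 1 := by omega
      rw [this, pvBinAux_eq]
      simp
    rw [hbin, List.reverse_reverse]
    rcases h : pvFlipRev (dLE (m+1)) with _ | r
    · -- for-else: all digits are '1', n = 2^k - 1
      have hz := flip_none_no_zero _ h
      have hall : ∀ c ∈ dLE (m+1), c = '1' := by
        intro c hc
        rcases dLE_chars (m+1) c hc with h0 | h1
        · exact absurd (h0 ▸ hc) hz
        · exact h1
      set k := (dLE (m+1)).length with hk
      have hrep : dLE (m+1) = List.replicate k '1' := List.eq_replicate_of_mem hall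
      have hval : m + 1 = 2 ^ k - 1 := by
        conv_lhs => rw [← valLE_dLE (m+1)]
        rw [hrep, valLE_replicate]
      have hk1 : 1 ≤ k := by
        rcases Nat.eq_zero_or_pos k with h0 | h1
        · exfalso; exact dLE_ne_nil (m+1) (by omega) (by rwa [h0, List.replicate_zero] at hrep)
        · exact h1
      have hdrop : ((dLE (m+1)).reverse).drop 1 = List.replicate (k-1) '1' := by
        rw [hrep, List.reverse_replicate, List.drop_replicate]
      simp only [hdrop]
      rw [hval, pvL_allones]
      have hk2 : k - 1 + 1 = k := by omega
      rw [← hk2, parse_one_zero_ones]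
      have h2k : (2:Nat) ^ (k-1+1) / 2 = 2 ^ (k-1) := by
        rw [pow_succ]; omega
      rw [h2k]
      have h1 : (1:Nat) ≤ 2 ^ (k-1) := Nat.one_le_two_pow
      have h1' : (1:Nat) ≤ 2 ^ (k-1+1) := Nat.one_le_two_pow
      have hc1 : ((2 ^ (k-1+1) - 1 : Nat) : Int) = 2 ^ (k-1+1) - 1 := by
        push_cast [h1']; ring
      rw [hc1]
      push_cast
      ring
    · -- break: the scan found a '0'
      have hv := flip_some_val (m+1) (by omega) r h
      rw [parse_reverse]
      omega

-- both outer foldl-append loops are maps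
theorem foldl_append_map {α β : Type} (f : α → β) (l : List α) :
    ∀ acc : List β, l.foldl (fun a x => a ++ [f x]) acc = acc ++ l.map f := by
  induction l with
  | nil => intro acc; simp
  | cons x xs ih => intro acc; rw [List.foldl_cons, ih]; simp

-- A's first loop builds exactly the list of per-element char lists
theorem canLoop_map (numbers : List Int) : ∀ acc : List (List Char),
    List.foldl (fun can num =>
        match pvFlipRev (pvBin num).reverse with
        | some r => can ++ [r.reverse]
        | none => can ++ ['1' :: '0' :: List.drop 1 (pvBin num)]) acc numbers
      = acc ++ numbers.map (fun num =>
        match pvFlipRev (pvBin num).reverse with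
        | some r => r.reverse
        | none => '1' :: '0' :: List.drop 1 (pvBin num)) := by
  induction numbers with
  | nil => intro acc; simp
  | cons x xs ihx =>
    intro acc
    rw [List.foldl_cons, ihx]
    rcases h : pvFlipRev (pvBin x).reverse with _ | r <;> simp [h]

-- B's Int bit trick, reduced to pvL on nonnegative input
theorem alt_elem (n : Int) (hn : 0 ≤ n) :
    n + Int.land (~~~n) (n + 1) - Int.shiftRight (Int.land (~~~n) (n + 1)) 1
      = n + (pvL n.toNat : Int) - ((pvL n.toNat) / 2 : Nat) := by
  obtain ⟨m, rfl⟩ := Int.eq_ofNat_of_zero_le hn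
  have hnot : ~~~(m : Int) = Int.negSucc m := rfl
  have hsucc : (m : Int) + 1 = Int.ofNat (m + 1) := by simp
  rw [hnot, hsucc]
  have hland : Int.land (Int.negSucc m) (Int.ofNat (m + 1)) = Int.ofNat (Nat.ldiff (m+1) m) := rfl
  rw [hland]
  have hshift : Int.shiftRight (Int.ofNat (Nat.ldiff (m+1) m)) 1
      = Int.ofNat (Nat.ldiff (m+1) m >>> 1) := rfl
  rw [hshift]
  have : Nat.ldiff (m+1) m >>> 1 = Nat.ldiff (m+1) m / 2 := by
    rw [Nat.shiftRight_succ, Nat.shiftRight_zero]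
  rw [this]
  simp [pvL, Int.ofNat_eq_natCast]

-- ===== VERDICT (by name: the statement is the Claim_ definition above) =====
theorem solution_spec : Claim_equal_solution := by
  intro numbers _hdom hpre
  unfold Spec_solution solution solution_alt
  simp only
  rw [foldl_append_map, foldl_append_map, canLoop_map numbers []]
  simp only [List.nil_append, List.map_map]
  apply List.map_congr_left
  intro n hn
  have hn0 : 0 ≤ n := hpre n hn
  have hm : ((n.toNat : Nat) : Int) = n := Int.toNat_of_nonneg hn0
  simp only [Function.comp]
  rw [alt_elem n hn0, ← hm, per_elem n.toNat, Int.toNat_natCast]
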